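-- pv_equiv track=rewrite | github.com/ksj1368/Algorithm | 프로그래머스/2/42626. 더 맵게/더 맵게.py | solution
-- ===== SOURCE A (Python) =====
-- import heapq
--
-- def solution(scoville, K):
--     cnt = 0
--     heapq.heapify(scoville)
--
--     while scoville[0] < K:
--         heapq.heappush(scoville, heapq.heappop(scoville) + 2*heapq.heappop(scoville))
--         cnt +=1
--         if len(scoville) == 1 and scoville[0] < K:
--             return -1
--     return cnt
-- ===== SOURCE B (Python) =====
-- def solution(scoville, K):
--     # No heap and no sorting: each round one linear scan over the unordered
--     # list finds the two smallest values; remove them by value, append the mix.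
--     # Mutates scoville in place (like A); residual layout differs from A's heap.
--     cnt = 0
--     while True:
--         a = scoville[0]          # IndexError on empty input, like A
--         b = None
--         for x in scoville[1:]:
--             if x < a:
--                 a, b = x, a
--             elif b is None or x < b:
--                 b = x
--         if a >= K:
--             return cnt
--         scoville.remove(a)
--         scoville.remove(b)       # ValueError on a 1-element list below K (A: IndexError)
--         scoville.append(a + 2 * b)
--         cnt += 1
--         if len(scoville) == 1 and scoville[0] < K:
--             return -1
-- ===== Notes on version B (the rewrite author's own statement) =====
-- stated objective: alternative
-- what changed: Drops the heap entirely: the list stays unordered and each round a single linear scan finds both of the two smallest values at once, which are then removed by value and replaced by the mix; no heapify, no heap pushes/pops, no sorted order is ever maintained.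
import Mathlib
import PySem

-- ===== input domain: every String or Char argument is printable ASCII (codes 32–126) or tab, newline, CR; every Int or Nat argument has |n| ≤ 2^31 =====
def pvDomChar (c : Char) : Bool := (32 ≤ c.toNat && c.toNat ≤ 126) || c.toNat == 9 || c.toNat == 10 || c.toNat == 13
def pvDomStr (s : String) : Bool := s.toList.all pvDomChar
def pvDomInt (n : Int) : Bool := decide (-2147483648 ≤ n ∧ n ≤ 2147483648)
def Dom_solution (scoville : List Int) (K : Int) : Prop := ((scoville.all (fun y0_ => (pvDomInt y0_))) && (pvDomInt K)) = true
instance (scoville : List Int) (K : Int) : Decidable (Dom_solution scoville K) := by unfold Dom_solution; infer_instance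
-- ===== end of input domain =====

-- B drops the heap: the list stays unordered; one linear scan per round finds the two
-- smallest values at once. Equivalence is about the RETURN value only: both mutate
-- scoville in place but leave different residual contents.

-- ===== PORT A =====
-- heapq.heappop = extract the minimum from the heap's multiset; heapq.heappush = add
-- the element; heapify only reorders scoville in place, so the heap state is carried
-- as the list's multiset.
def heapPop (h : List Int) : Option (Int × List Int) :=
  match PySem.List.min? h (fun x => x) with
  | none => none
  | some m => some (m, h.erase m)

-- while scoville[0] < K: pop two minima, push a + 2*b; scoville[0] of a heap is its minimum.
def solutionLoop (h : List Int) (K : Int) (cnt : Int) : Int :=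
  match hp : heapPop h with
  | none => 0                      -- scoville[0] on empty: IndexError, outside Pre_
  | some (a, r) =>
    if a < K then
      match hq : heapPop r with
      | none => -2                 -- second heappop on empty: IndexError, outside Pre_
      | some (b, r2) =>
        let h' := r2 ++ [a + 2 * b]
        if h'.length = 1 ∧ h'.headI < K then -1
        else solutionLoop h' K (cnt + 1)
    else cnt
  termination_by h.length
  decreasing_by
    simp only [heapPop] at hp hq
    rcases hm : PySem.List.min? h (fun x => x) with _ | m <;> simp [hm] at hp
    rcases hm2 : PySem.List.min? r (fun x => x) with _ | m2 <;> rw [hm2] at hq <;> simp at hq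
    obtain ⟨ha, hr⟩ := hp
    obtain ⟨hb, hr2⟩ := hq
    have h1 : m ∈ h := PySem.List.min?_mem hm
    have h2 : m2 ∈ r := PySem.List.min?_mem hm2
    subst hr hr2
    have l1 := List.length_erase_of_mem h1
    have l2 := List.length_erase_of_mem h2
    have hp1 : 0 < h.length := List.length_pos_of_mem h1
    have hp2 : 0 < (h.erase m).length := List.length_pos_of_mem h2
    simp only [List.length_append, List.length_cons, List.length_nil, l1, l2]
    omega

def solution (scoville : List Int) (K : Int) : Int :=
  solutionLoop scoville K 0

-- ===== PORT B =====
-- the for-loop of Source B: state (a, b) = smallest and (optional) second-smallest seen so far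
def scanTwo : List Int → Int → Option Int → Int × Option Int
  | [], a, b => (a, b)
  | x :: t, a, b =>
    if x < a then scanTwo t x (some a)
    else if (match b with | none => true | some bv => x < bv) then scanTwo t a (some x)
    else scanTwo t a b

-- scan invariant, needed by altLoop's termination proof: the pair returned is the
-- two smallest of the scanned multiset (everything dropped is ≥ the second output)
theorem scan_some : ∀ (xs : List Int) (a bv : Int), a ≤ bv →
    ∃ p q r', scanTwo xs a (some bv) = (p, some q) ∧ p ≤ q ∧ q ≤ bv ∧
      (a :: bv :: xs).Perm (p :: q :: r') ∧ ∀ y ∈ r', q ≤ y := by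
  intro xs
  induction xs with
  | nil =>
    intro a bv hab
    exact ⟨a, bv, [], rfl, hab, le_refl _, List.Perm.refl _, by simp⟩
  | cons x t ih =>
    intro a bv hab
    by_cases h1 : x < a
    · obtain ⟨p, q, r', he, hpq, hqa, hperm, hall⟩ := ih x a (le_of_lt h1)
      refine ⟨p, q, bv :: r', ?_, hpq, le_trans hqa hab, ?_, ?_⟩
      · simp only [scanTwo, if_pos h1]; exact he
      · -- a::bv::x::t ~ p::q::bv::r'
        have s1 : (a :: bv :: x :: t).Perm (bv :: x :: a :: t) :=
          (List.Perm.swap _ _ _).trans (List.Perm.cons _ (List.Perm.swap _ _ _))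
        have s2 : (bv :: x :: a :: t).Perm (bv :: p :: q :: r') := List.Perm.cons _ hperm
        have s3 : (bv :: p :: q :: r').Perm (p :: q :: bv :: r') :=
          (List.Perm.swap _ _ _).trans (List.Perm.cons _ (List.Perm.swap _ _ _))
        exact (s1.trans s2).trans s3
      · intro y hy
        rcases List.mem_cons.mp hy with h | h
        · subst h; exact le_trans hqa hab
        · exact hall y h
    · by_cases h2 : x < bv
      · obtain ⟨p, q, r', he, hpq, hqx, hperm, hall⟩ := ih a x (le_of_not_gt h1)
        refine ⟨p, q, bv :: r', ?_, hpq, le_trans hqx (le_of_lt h2), ?_, ?_⟩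
        · simp only [scanTwo, if_neg h1]; rw [if_pos (by simpa using h2)]; exact he
        · have s1 : (a :: bv :: x :: t).Perm (bv :: a :: x :: t) := List.Perm.swap _ _ _
          have s2 : (bv :: a :: x :: t).Perm (bv :: p :: q :: r') := List.Perm.cons _ hperm
          have s3 : (bv :: p :: q :: r').Perm (p :: q :: bv :: r') :=
            (List.Perm.swap _ _ _).trans (List.Perm.cons _ (List.Perm.swap _ _ _))
          exact (s1.trans s2).trans s3
        · intro y hy
          rcases List.mem_cons.mp hy with h | h
          · subst h; exact le_trans hqx (le_of_lt h2)
          · exact hall y h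
      · obtain ⟨p, q, r', he, hpq, hqb, hperm, hall⟩ := ih a bv hab
        refine ⟨p, q, x :: r', ?_, hpq, hqb, ?_, ?_⟩
        · simp only [scanTwo, if_neg h1]; rw [if_neg (by simpa using h2)]; exact he
        · have s1 : (a :: bv :: x :: t).Perm (x :: a :: bv :: t) :=
            (List.Perm.cons _ (List.Perm.swap _ _ _)).trans (List.Perm.swap _ _ _)
          have s2 : (x :: a :: bv :: t).Perm (x :: p :: q :: r') := List.Perm.cons _ hperm
          have s3 : (x :: p :: q :: r').Perm (p :: q :: x :: r') :=
            (List.Perm.swap _ _ _).trans (List.Perm.cons _ (List.Perm.swap _ _ _))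
          exact (s1.trans s2).trans s3
        · intro y hy
          rcases List.mem_cons.mp hy with h | h
          · subst h; exact le_trans hqb (le_of_not_gt h2)
          · exact hall y h

theorem scan_none_ne : ∀ (x : Int) (t : List Int) (a : Int),
    ∃ p q r', scanTwo (x :: t) a none = (p, some q) ∧ p ≤ q ∧
      (a :: x :: t).Perm (p :: q :: r') ∧ ∀ y ∈ r', q ≤ y := by
  intro x t a
  by_cases h1 : x < a
  · obtain ⟨p, q, r', he, hpq, _, hperm, hall⟩ := scan_some t x a (le_of_lt h1)
    refine ⟨p, q, r', ?_, hpq, ?_, hall⟩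
    · simp only [scanTwo, if_pos h1]; exact he
    · exact List.Perm.trans (List.Perm.swap _ _ _) hperm
  · obtain ⟨p, q, r', he, hpq, _, hperm, hall⟩ := scan_some t a x (le_of_not_gt h1)
    refine ⟨p, q, r', ?_, hpq, hperm, hall⟩
    simp only [scanTwo, if_neg h1]; exact he

def altLoop (s : List Int) (K : Int) (cnt : Int) : Int :=
  match s with
  | [] => 0                        -- scoville[0] on empty: IndexError, outside Pre_
  | a0 :: rest =>
    match hscan : scanTwo rest a0 none with
    | (a, b?) =>
      if a < K then
        match b? with
        | none => -2               -- scoville.remove(None): ValueError, outside Pre_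
        | some b =>
          -- remove(a); remove(b): a, b are elements of scoville (the scan found them),
          -- so ValueError is unreachable and List.erase is exact
          let s' := ((a0 :: rest).erase a).erase b ++ [a + 2 * b]
          if s'.length = 1 ∧ s'.headI < K then -1
          else altLoop s' K (cnt + 1)
      else cnt
  termination_by s.length
  decreasing_by
    have hne : rest ≠ [] := by rintro rfl; simp [scanTwo] at hscan
    obtain ⟨x, t, rfl⟩ := List.exists_cons_of_ne_nil hne
    obtain ⟨p, q, r', he, hpq, hperm, hall⟩ := scan_none_ne x t a0
    rw [he] at hscan
    injection hscan with h1 h2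
    injection h2 with h2
    subst h1; subst h2
    have hperm1 : ((a0 :: x :: t).erase p).Perm ((p :: q :: r').erase p) := hperm.erase p
    rw [List.erase_cons_head] at hperm1
    have hperm2 : (((a0 :: x :: t).erase p).erase q).Perm ((q :: r').erase q) := hperm1.erase q
    rw [List.erase_cons_head] at hperm2
    have l0 := hperm.length_eq
    have l1 := hperm1.length_eq
    have l2 := hperm2.length_eq
    simp only [List.length_append, List.length_cons, List.length_nil] at *
    omega

def solution_alt (scoville : List Int) (K : Int) : Int :=
  altLoop scoville K 0

-- ===== PRECONDITION & SPEC =====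
-- Pre_ excludes exactly the inputs on which A raises IndexError: the empty list
-- (scoville[0]) and a one-element list below K (the second heappop); B raises there too
-- (IndexError on empty, ValueError from remove on the singleton).
def Pre_solution (scoville : List Int) (K : Int) : Prop :=
  scoville ≠ [] ∧ (scoville.length = 1 → K ≤ scoville.headI)
instance (scoville : List Int) (K : Int) : Decidable (Pre_solution scoville K) := by
  unfold Pre_solution; infer_instance

def pvWitness_solution : List Int × Int := ([1, 2, 3, 9, 10, 12], 7)

def Spec_solution (scoville : List Int) (K : Int) (out : Int) : Prop := out = solution_alt scoville K
instance (scoville : List Int) (K : Int) (out : Int) : Decidable (Spec_solution scoville K out) := by unfold Spec_solution; infer_instance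

-- ===== CLAIM (what is proved, stated in full; the proofs are below) =====
def Claim_equal_solution : Prop := ∀ (scoville : List Int) (K : Int), Dom_solution scoville K → Pre_solution scoville K → Spec_solution scoville K (solution scoville K)

-- ===== LEMMAS AND PROOFS =====

theorem min?_eq_of_min {h : List Int} {m : Int} (hmem : m ∈ h)
    (hmin : ∀ y ∈ h, m ≤ y) : PySem.List.min? h (fun x => x) = some m := by
  rcases hm : PySem.List.min? h (fun x => x) with _ | m'
  · have : h = [] := (PySem.List.min?_eq_none_iff _ _).mp hm
    subst this; simp at hmem
  · have h1 : m' ≤ m := PySem.List.min?_isMin hm m hmem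
    have h2 : m ≤ m' := hmin m' (PySem.List.min?_mem hm)
    rw [le_antisymm h1 h2]

-- equation lemmas for A's loop
theorem solutionLoop_none (h : List Int) (K cnt : Int) (hp : heapPop h = none) :
    solutionLoop h K cnt = 0 := by
  rw [solutionLoop.eq_def]; split
  · rfl
  · rename_i a r heq; rw [hp] at heq; cases heq

theorem solutionLoop_stop (h : List Int) (K cnt a : Int) (r : List Int)
    (hp : heapPop h = some (a, r)) (hk : ¬ a < K) : solutionLoop h K cnt = cnt := by
  rw [solutionLoop.eq_def]; split
  · rename_i heq; rw [hp] at heq; cases heq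
  · rename_i a' r' heq; rw [hp] at heq
    injection heq with heq'; injection heq' with h1 h2
    subst h1; subst h2; rw [if_neg hk]

theorem solutionLoop_crash (h : List Int) (K cnt a : Int) (r : List Int)
    (hp : heapPop h = some (a, r)) (hk : a < K) (hq : heapPop r = none) :
    solutionLoop h K cnt = -2 := by
  rw [solutionLoop.eq_def]; split
  · rename_i heq; rw [hp] at heq; cases heq
  · rename_i a' r' heq; rw [hp] at heq
    injection heq with heq'; injection heq' with h1 h2
    subst h1; subst h2; rw [if_pos hk]; split
    · rfl
    · rename_i b r2 heq2; rw [hq] at heq2; cases heq2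

theorem solutionLoop_step (h : List Int) (K cnt a b : Int) (r r2 : List Int)
    (hp : heapPop h = some (a, r)) (hk : a < K) (hq : heapPop r = some (b, r2)) :
    solutionLoop h K cnt =
      if (r2 ++ [a + 2 * b]).length = 1 ∧ (r2 ++ [a + 2 * b]).headI < K then -1
      else solutionLoop (r2 ++ [a + 2 * b]) K (cnt + 1) := by
  rw [solutionLoop.eq_def]; split
  · rename_i heq; rw [hp] at heq; cases heq
  · rename_i a' r' heq; rw [hp] at heq
    injection heq with heq'; injection heq' with h1 h2
    subst h1; subst h2; rw [if_pos hk]; split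
    · rename_i heq2; rw [hq] at heq2; cases heq2
    · rename_i b' r2' heq2; rw [hq] at heq2
      injection heq2 with heq2'; injection heq2' with h3 h4
      subst h3; subst h4; rfl

-- equation lemmas for B's loop
theorem altLoop_nil (K cnt : Int) : altLoop [] K cnt = 0 := by
  rw [altLoop.eq_def]

theorem altLoop_eq_none (a0 : Int) (rest : List Int) (K cnt a : Int)
    (h : scanTwo rest a0 none = (a, none)) :
    altLoop (a0 :: rest) K cnt = if a < K then -2 else cnt := by
  rw [altLoop.eq_def]
  split
  · rename_i heq
    exact absurd heq (by simp)
  · rename_i a0' rest' heq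
    injection heq with e1 e2
    subst e1; subst e2
    split
    · rename_i a' b?' heq2
      rw [h] at heq2
      injection heq2 with h1 h2
      subst h1; subst h2
      rfl

theorem altLoop_eq_some (a0 : Int) (rest : List Int) (K cnt a b : Int)
    (h : scanTwo rest a0 none = (a, some b)) :
    altLoop (a0 :: rest) K cnt =
      if a < K then
        (if (((a0 :: rest).erase a).erase b ++ [a + 2 * b]).length = 1 ∧
            (((a0 :: rest).erase a).erase b ++ [a + 2 * b]).headI < K then -1
         else altLoop (((a0 :: rest).erase a).erase b ++ [a + 2 * b]) K (cnt + 1))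
      else cnt := by
  rw [altLoop.eq_def]
  split
  · rename_i heq
    exact absurd heq (by simp)
  · rename_i a0' rest' heq
    injection heq with e1 e2
    subst e1; subst e2
    split
    · rename_i a' b?' heq2
      rw [h] at heq2
      injection heq2 with h1 h2
      subst h1; subst h2
      rfl

-- main loop equality: A's heap multiset step and B's scan-and-remove step pick the
-- same two values and leave value-wise the same list
theorem loops_eq : ∀ n (s : List Int) (K cnt : Int), s.length = n →
    solutionLoop s K cnt = altLoop s K cnt := by
  intro n
  induction n using Nat.strong_induction_on with
  | _ n ih =>
    intro s K cnt hlen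
    match s with
    | [] =>
      rw [altLoop_nil]
      exact solutionLoop_none _ _ _ (by simp [heapPop, (PySem.List.min?_eq_none_iff _ _).mpr rfl])
    | [a0] =>
      have hscan : scanTwo ([] : List Int) a0 none = (a0, none) := rfl
      rw [altLoop_eq_none a0 [] K cnt a0 hscan]
      have hmin : PySem.List.min? [a0] (fun x => x) = some a0 :=
        min?_eq_of_min (by simp) (by simp)
      have hpop : heapPop [a0] = some (a0, []):= by simp [heapPop, hmin]
      by_cases hk : a0 < K
      · rw [if_pos hk]
        exact solutionLoop_crash _ _ _ _ _ hpop hk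
          (by simp [heapPop, (PySem.List.min?_eq_none_iff _ _).mpr rfl])
      · rw [if_neg hk]
        exact solutionLoop_stop _ _ _ _ _ hpop hk
    | a0 :: x :: t =>
      obtain ⟨p, q, r', he, hpq, hperm, hall⟩ := scan_none_ne x t a0
      have hmemall : ∀ y ∈ (a0 :: x :: t), p ≤ y := by
        intro y hy
        rcases List.mem_cons.mp (hperm.mem_iff.mp hy) with h | h
        · omega
        · rcases List.mem_cons.mp h with h | h
          · omega
          · exact le_trans hpq (hall y h)
      have hmin : PySem.List.min? (a0 :: x :: t) (fun x => x) = some p :=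
        min?_eq_of_min (hperm.mem_iff.mpr (List.mem_cons_self ..)) hmemall
      have hpop : heapPop (a0 :: x :: t) = some (p, (a0 :: x :: t).erase p) := by
        simp [heapPop, hmin]
      rw [altLoop_eq_some a0 (x :: t) K cnt p q he]
      by_cases hk : p < K
      · rw [if_pos hk]
        have hperm1 : ((a0 :: x :: t).erase p).Perm (q :: r') := by
          have := hperm.erase p
          rwa [List.erase_cons_head] at this
        have hmin2 : PySem.List.min? ((a0 :: x :: t).erase p) (fun x => x) = some q := by
          refine min?_eq_of_min (hperm1.mem_iff.mpr (List.mem_cons_self ..)) ?_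
          intro y hy
          rcases List.mem_cons.mp (hperm1.mem_iff.mp hy) with h | h
          · omega
          · exact hall y h
        have hpop2 : heapPop ((a0 :: x :: t).erase p) =
            some (q, ((a0 :: x :: t).erase p).erase q) := by
          simp [heapPop, hmin2]
        rw [solutionLoop_step _ _ _ _ _ _ _ hpop hk hpop2]
        have hperm2 : (((a0 :: x :: t).erase p).erase q).Perm r' := by
          have := hperm1.erase q
          rwa [List.erase_cons_head] at this
        by_cases hc : ((((a0 :: x :: t).erase p).erase q ++ [p + 2 * q]).length = 1 ∧
            (((a0 :: x :: t).erase p).erase q ++ [p + 2 * q]).headI < K)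
        · rw [if_pos hc, if_pos hc]
        · rw [if_neg hc, if_neg hc]
          refine ih _ ?_ _ _ _ rfl
          have l0 := hperm.length_eq
          have l2 := hperm2.length_eq
          simp only [List.length_append, List.length_cons, List.length_nil] at *
          omega
      · rw [if_neg hk]
        exact solutionLoop_stop _ _ _ _ _ hpop hk

-- ===== VERDICT (by name: the statement is the Claim_ definition above) =====
theorem solution_spec : Claim_equal_solution := by
  intro scoville K _ _
  unfold Spec_solution solution solution_alt
  exact loops_eq scoville.length scoville K 0 rfl
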